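-- pv_equiv track=rewrite | github.com/gorynych13/algorithms_python | lesson_07/ex_03.py | mediana_array
-- ===== SOURCE A (Python) =====
-- def mediana_array(array):
--
--     for i in range(len(array)):
--         no_more = 0
--         no_less = 0
--         is_equal = 0
--         for j in range(len(array)):
--             if i == j:
--                 continue
--             if array[i] < array[j]:
--                 no_less += 1
--             elif array[i] > array[j]:
--                 no_more += 1
--             else:
--                 is_equal += 1
--
--         if no_more == no_less:
--             return array[i]
--         # Вот тут выглядит как костыль, но ничего лучше пока придумать не смог
--         if no_more <= len(array) // 2 and no_less <= len(array) // 2 and is_equal >= 1: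
--             return array[i]
-- ===== SOURCE B (Python) =====
-- def _bisect_left(s, x):
--     lo, hi = 0, len(s)
--     while lo < hi:
--         mid = (lo + hi) // 2
--         if s[mid] < x:
--             lo = mid + 1
--         else:
--             hi = mid
--     return lo
--
--
-- def _bisect_right(s, x):
--     lo, hi = 0, len(s)
--     while lo < hi:
--         mid = (lo + hi) // 2
--         if x < s[mid]:
--             hi = mid
--         else:
--             lo = mid + 1
--     return lo
--
--
-- def mediana_array(array):
--     n = len(array)
--     s = sorted(array)
--     half = n // 2
--     for x in array:
--         less = _bisect_left(s, x)          # elements strictly below x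
--         greater = n - _bisect_right(s, x)  # elements strictly above x
--         equal = n - less - greater - 1     # other elements equal to x
--         if less == greater or (less <= half and greater <= half and equal >= 1):
--             return x
--     return None
-- ===== Notes on version B (the rewrite author's own statement) =====
-- stated objective: faster
-- what changed: Replaces A's quadratic all-pairs comparison loop per element by one sort of the array plus two hand-written binary searches (bisect_left/bisect_right) per element to get the same less/greater/equal counts, scanning the original order for the first qualifying element.
import Mathlib
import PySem

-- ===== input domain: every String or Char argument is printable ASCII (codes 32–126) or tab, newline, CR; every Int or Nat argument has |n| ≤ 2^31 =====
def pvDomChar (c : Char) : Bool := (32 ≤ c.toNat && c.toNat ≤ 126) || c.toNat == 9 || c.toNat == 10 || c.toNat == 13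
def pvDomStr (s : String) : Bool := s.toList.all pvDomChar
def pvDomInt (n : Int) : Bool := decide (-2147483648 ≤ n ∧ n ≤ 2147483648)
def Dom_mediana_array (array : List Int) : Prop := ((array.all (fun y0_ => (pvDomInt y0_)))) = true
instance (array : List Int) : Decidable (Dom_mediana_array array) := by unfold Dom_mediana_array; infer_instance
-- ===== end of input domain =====

-- B replaces A's quadratic pairwise-count scan by one sort plus two binary searches per
-- element (O(n log n) vs O(n^2)); same first-match-in-original-order result.

-- ===== PORT A =====
def mediana_array (array : List Int) : Option Int :=
  let n : Int := PySem.List.len array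
  (PySem.List.pyRange 0 n).foldl (fun acc i =>
    match acc with
    | some r => some r
    | none =>
      -- state (no_more, no_less, is_equal)
      let c := (PySem.List.pyRange 0 n).foldl (fun (st : Int × Int × Int) j =>
        if i = j then st
        else if PySem.List.pyGetD array i 0 < PySem.List.pyGetD array j 0 then
          (st.1, st.2.1 + 1, st.2.2)
        else if PySem.List.pyGetD array i 0 > PySem.List.pyGetD array j 0 then
          (st.1 + 1, st.2.1, st.2.2)
        else (st.1, st.2.1, st.2.2 + 1)) (0, 0, 0)
      if c.1 = c.2.1 then some (PySem.List.pyGetD array i 0)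
      else if c.1 ≤ PySem.Int.floordiv n 2 ∧ c.2.1 ≤ PySem.Int.floordiv n 2 ∧ c.2.2 ≥ 1 then
        some (PySem.List.pyGetD array i 0)
      else none) none

-- ===== PORT B =====
def mediana_array_alt (array : List Int) : Option Int :=
  let n : Int := PySem.List.len array
  let s := PySem.List.sorted array (fun x => x)
  let half : Int := PySem.Int.floordiv n 2
  array.foldl (fun acc x =>
    match acc with
    | some r => some r
    | none =>
      let less : Int := (PySem.List.bisectLeft s x : Int)
      let greater : Int := n - (PySem.List.bisectRight s x : Int)
      let equal : Int := n - less - greater - 1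
      if less = greater ∨ (less ≤ half ∧ greater ≤ half ∧ equal ≥ 1) then some x
      else none) none

-- ===== PRECONDITION & SPEC =====
def Spec_mediana_array (array : List Int) (out : Option Int) : Prop := out = mediana_array_alt array
instance (array : List Int) (out : Option Int) : Decidable (Spec_mediana_array array out) := by unfold Spec_mediana_array; infer_instance

-- ===== CLAIM (what is proved, stated in full; the proofs are below) =====
def Claim_equal_mediana_array : Prop := ∀ (array : List Int), Dom_mediana_array array → Spec_mediana_array array (mediana_array array)

-- ===== LEMMAS AND PROOFS =====

-- counts of elements below / equal to / above x
def cntLt (array : List Int) (x : Int) : Nat := array.countP (fun y => decide (y < x))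
def cntGt (array : List Int) (x : Int) : Nat := array.countP (fun y => decide (x < y))
def cntEq (array : List Int) (x : Int) : Nat := array.countP (fun y => decide (y = x))
def cntLe (array : List Int) (x : Int) : Nat := array.countP (fun y => decide (y ≤ x))

lemma cnt_tri (array : List Int) (x : Int) :
    cntLt array x + cntEq array x + cntGt array x = array.length := by
  induction array with
  | nil => rfl
  | cons a l ih =>
    simp only [cntLt, cntEq, cntGt, List.countP_cons, List.length_cons] at *
    rcases lt_trichotomy a x with h | h | h
    · simp [h, ne_of_lt h, not_lt.mpr h.le]; omega
    · simp [h]; omega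
    · simp [not_lt.mpr h.le, h, ne_of_gt h]; omega

lemma cnt_le_split (array : List Int) (x : Int) :
    cntLe array x + cntGt array x = array.length := by
  induction array with
  | nil => rfl
  | cons a l ih =>
    simp only [cntLe, cntGt, List.countP_cons] at *
    by_cases h : a ≤ x
    · simp [h, not_lt.mpr h]; omega
    · simp [h, not_le.mp h]; omega

-- bisectLeft on the sorted copy counts the elements strictly below x
-- on a ≤-sorted list, the first k elements are exactly those satisfying p
lemma countP_eq_of_prefix (s : List Int) (p : Int → Bool) (k : Nat) (hk : k ≤ s.length)
    (hlt : ∀ (j : Nat) (hj : j < s.length), j < k → p s[j] = true)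
    (hge : ∀ (j : Nat) (hj : j < s.length), k ≤ j → p s[j] = false) :
    s.countP p = k := by
  have h1 : (s.take k).countP p = (s.take k).length := by
    refine List.countP_eq_length.2 ?_
    intro a ha
    obtain ⟨j, hj, rfl⟩ := List.mem_iff_getElem.1 ha
    have hjk : j < k := by
      have := hj; simp [List.length_take] at this; omega
    have hjs : j < s.length := lt_of_lt_of_le hjk hk
    simpa [List.getElem_take] using hlt j hjs hjk
  have h2 : (s.drop k).countP p = 0 := by
    refine List.countP_eq_zero.2 ?_
    intro a ha
    obtain ⟨j, hj, rfl⟩ := List.mem_iff_getElem.1 ha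
    have hjs : k + j < s.length := by
      have := hj; simp [List.length_drop] at this; omega
    simp [List.getElem_drop, hge (k + j) hjs (Nat.le_add_right k j)]
  have : s.countP p = (s.take k).countP p + (s.drop k).countP p := by
    rw [← List.countP_append, List.take_append_drop]
  rw [this, h1, h2, List.length_take]
  omega

lemma bisectLeft_eq_cntLt (array : List Int) (x : Int) :
    PySem.List.bisectLeft (PySem.List.sorted array (fun x => x)) x = cntLt array x := by
  have hp : (PySem.List.sorted array (fun x => x)).Pairwise (fun a b => a ≤ b) :=
    PySem.List.sorted_pairwise array (fun x => x)
  obtain ⟨hk, hlt, hge⟩ := PySem.List.bisectLeft_spec (PySem.List.sorted array (fun x => x)) x hp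
  have hcnt := countP_eq_of_prefix (PySem.List.sorted array (fun x => x))
      (fun y => decide (y < x)) (PySem.List.bisectLeft (PySem.List.sorted array (fun x => x)) x) hk
      (fun j hj hjk => by simpa using hlt j hj hjk)
      (fun j hj hjk => by simpa using not_lt.2 (hge j hj hjk))
  unfold cntLt
  rw [← (PySem.List.sorted_perm array (fun x => x) false).countP_eq]
  exact hcnt.symm

lemma bisectRight_eq_cntLe (array : List Int) (x : Int) :
    PySem.List.bisectRight (PySem.List.sorted array (fun x => x)) x = cntLe array x := by
  have hp : (PySem.List.sorted array (fun x => x)).Pairwise (fun a b => a ≤ b) :=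
    PySem.List.sorted_pairwise array (fun x => x)
  obtain ⟨hk, hle, hgt⟩ := PySem.List.bisectRight_spec (PySem.List.sorted array (fun x => x)) x hp
  have hcnt := countP_eq_of_prefix (PySem.List.sorted array (fun x => x))
      (fun y => decide (y ≤ x)) (PySem.List.bisectRight (PySem.List.sorted array (fun x => x)) x) hk
      (fun j hj hjk => by simpa using hle j hj hjk)
      (fun j hj hjk => by simpa using not_le.2 (hgt j hj hjk))
  unfold cntLe
  rw [← (PySem.List.sorted_perm array (fun x => x) false).countP_eq]
  exact hcnt.symm

-- the inner fold accumulates three countP's of its branch tests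
lemma fold_counts (array : List Int) (i a : Int) (l : List Int) (st : Int × Int × Int) :
    l.foldl (fun (st : Int × Int × Int) j =>
        if i = j then st
        else if a < PySem.List.pyGetD array j 0 then (st.1, st.2.1 + 1, st.2.2)
        else if a > PySem.List.pyGetD array j 0 then (st.1 + 1, st.2.1, st.2.2)
        else (st.1, st.2.1, st.2.2 + 1)) st
      = (st.1 + (l.countP (fun j => !decide (i = j) && !decide (a < PySem.List.pyGetD array j 0)
                    && decide (a > PySem.List.pyGetD array j 0)) : Int),
         st.2.1 + (l.countP (fun j => !decide (i = j) && decide (a < PySem.List.pyGetD array j 0)) : Int),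
         st.2.2 + (l.countP (fun j => !decide (i = j) && !decide (a < PySem.List.pyGetD array j 0)
                    && !decide (a > PySem.List.pyGetD array j 0)) : Int)) := by
  induction l generalizing st with
  | nil => simp
  | cons j l ih =>
    rw [List.foldl_cons, ih]
    by_cases h1 : i = j
    · simp [h1]
    · by_cases h2 : a < PySem.List.pyGetD array j 0
      · simp [h1, h2, lt_asymm h2]
        omega
      · by_cases h3 : a > PySem.List.pyGetD array j 0
        · simp [h1, h2, h3]
          omega
        · simp [h1, h2, h3]
          omega

-- counting over all indices except i equals counting over the values, minus the i-th value
lemma countP_skip (array : List Int) (i : Int) (h0 : 0 ≤ i) (h1 : i < PySem.List.len array)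
    (p : Int → Bool) :
    (PySem.List.pyRange 0 (PySem.List.len array)).countP
        (fun j => !decide (i = j) && p (PySem.List.pyGetD array j 0))
      + (if p (PySem.List.pyGetD array i 0) then 1 else 0)
      = array.countP p := by
  have hfull : array.countP p
      = (PySem.List.pyRange 0 (PySem.List.len array)).countP
          (fun j => p (PySem.List.pyGetD array j 0)) := by
    conv_lhs => rw [← PySem.List.map_pyGetD_pyRange_zero array 0]
    rw [List.countP_map]
    rfl
  have hn : i < PySem.List.len array := h1
  have hsplit : PySem.List.pyRange 0 (PySem.List.len array)
      = PySem.List.pyRange 0 i ++ ([i] ++ PySem.List.pyRange (i + 1) (PySem.List.len array)) := by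
    rw [← PySem.List.pyRange_one_singleton i, ← PySem.List.pyRange_one_append i (i+1) _ (by omega) (by omega),
        ← PySem.List.pyRange_one_append 0 i _ h0 (le_of_lt hn)]
  have hcongr : ∀ (seg : List Int), i ∉ seg →
      seg.countP (fun j => !decide (i = j) && p (PySem.List.pyGetD array j 0))
        = seg.countP (fun j => p (PySem.List.pyGetD array j 0)) := by
    intro seg hni
    refine List.countP_congr ?_
    intro j hj
    have : i ≠ j := fun h => hni (h ▸ hj)
    simp [this]
  have hl : i ∉ PySem.List.pyRange 0 i := by
    intro h; have := PySem.List.mem_pyRange_one.1 h; omega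
  have hr : i ∉ PySem.List.pyRange (i + 1) (PySem.List.len array) := by
    intro h; have := PySem.List.mem_pyRange_one.1 h; omega
  rw [hfull, hsplit]
  simp only [List.countP_append, hcongr _ hl, hcongr _ hr, List.countP_cons, List.countP_nil]
  simp
  omega

-- A's inner loop over pyRange computes the three counts
lemma inner_counts (array : List Int) (i : Int) (h0 : 0 ≤ i) (h1 : i < PySem.List.len array) :
    (PySem.List.pyRange 0 (PySem.List.len array)).foldl (fun (st : Int × Int × Int) j =>
        if i = j then st
        else if PySem.List.pyGetD array i 0 < PySem.List.pyGetD array j 0 then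
          (st.1, st.2.1 + 1, st.2.2)
        else if PySem.List.pyGetD array i 0 > PySem.List.pyGetD array j 0 then
          (st.1 + 1, st.2.1, st.2.2)
        else (st.1, st.2.1, st.2.2 + 1)) (0, 0, 0)
      = ((cntLt array (PySem.List.pyGetD array i 0) : Int),
         (cntGt array (PySem.List.pyGetD array i 0) : Int),
         (cntEq array (PySem.List.pyGetD array i 0) : Int) - 1) := by
  rw [fold_counts]
  have e1 := countP_skip array i h0 h1
      (fun y => !decide (PySem.List.pyGetD array i 0 < y) && decide (PySem.List.pyGetD array i 0 > y))
  have e2 := countP_skip array i h0 h1 (fun y => decide (PySem.List.pyGetD array i 0 < y))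
  have e3 := countP_skip array i h0 h1
      (fun y => !decide (PySem.List.pyGetD array i 0 < y) && !decide (PySem.List.pyGetD array i 0 > y))
  simp only [Bool.and_assoc] at *
  rw [if_neg (by simp)] at e1
  rw [if_neg (by simp)] at e2
  rw [if_pos (by simp)] at e3
  have c1 : array.countP
      (fun y => !decide (PySem.List.pyGetD array i 0 < y) && decide (PySem.List.pyGetD array i 0 > y))
      = cntLt array (PySem.List.pyGetD array i 0) := by
    refine List.countP_congr ?_
    intro y _; simp; omega
  have c3 : array.countP
      (fun y => !decide (PySem.List.pyGetD array i 0 < y) && !decide (PySem.List.pyGetD array i 0 > y))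
      = cntEq array (PySem.List.pyGetD array i 0) := by
    refine List.countP_congr ?_
    intro y _; simp; omega
  rw [c1] at e1
  rw [c3] at e3
  have c2 : array.countP (fun y => decide (PySem.List.pyGetD array i 0 < y))
      = cntGt array (PySem.List.pyGetD array i 0) := rfl
  rw [c2] at e2
  simp only [Prod.ext_iff]
  refine ⟨by omega, by omega, by omega⟩

-- the common per-element step: decide from the three counts of the whole list
def gStep (array : List Int) (acc : Option Int) (x : Int) : Option Int :=
  match acc with
  | some r => some r
  | none =>
    if (cntLt array x : Int) = (cntGt array x : Int) then some x
    else if (cntLt array x : Int) ≤ PySem.Int.floordiv (PySem.List.len array) 2 ∧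
            (cntGt array x : Int) ≤ PySem.Int.floordiv (PySem.List.len array) 2 ∧
            ((cntEq array x : Int) - 1) ≥ 1 then some x
    else none

lemma a_eq_fold (array : List Int) : mediana_array array = array.foldl (gStep array) none := by
  unfold mediana_array
  have h : ∀ (acc : Option Int), ∀ i ∈ PySem.List.pyRange 0 (PySem.List.len array),
      (fun (acc : Option Int) i =>
        match acc with
        | some r => some r
        | none =>
          let c := (PySem.List.pyRange 0 (PySem.List.len array)).foldl (fun (st : Int × Int × Int) j =>
            if i = j then st
            else if PySem.List.pyGetD array i 0 < PySem.List.pyGetD array j 0 then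
              (st.1, st.2.1 + 1, st.2.2)
            else if PySem.List.pyGetD array i 0 > PySem.List.pyGetD array j 0 then
              (st.1 + 1, st.2.1, st.2.2)
            else (st.1, st.2.1, st.2.2 + 1)) (0, 0, 0)
          if c.1 = c.2.1 then some (PySem.List.pyGetD array i 0)
          else if c.1 ≤ PySem.Int.floordiv (PySem.List.len array) 2 ∧
              c.2.1 ≤ PySem.Int.floordiv (PySem.List.len array) 2 ∧ c.2.2 ≥ 1 then
            some (PySem.List.pyGetD array i 0)
          else none) acc i
        = gStep array acc (PySem.List.pyGetD array i 0) := by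
    intro acc i hi
    have hm := PySem.List.mem_pyRange_one.1 hi
    cases acc with
    | some r => rfl
    | none =>
      dsimp only
      rw [show (PySem.List.pyRange 0 (PySem.List.len array)).foldl (fun (st : Int × Int × Int) j =>
            if i = j then st
            else if PySem.List.pyGetD array i 0 < PySem.List.pyGetD array j 0 then
              (st.1, st.2.1 + 1, st.2.2)
            else if PySem.List.pyGetD array i 0 > PySem.List.pyGetD array j 0 then
              (st.1 + 1, st.2.1, st.2.2)
            else (st.1, st.2.1, st.2.2 + 1)) (0, 0, 0)
          = ((cntLt array (PySem.List.pyGetD array i 0) : Int),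
             (cntGt array (PySem.List.pyGetD array i 0) : Int),
             (cntEq array (PySem.List.pyGetD array i 0) : Int) - 1)
        from inner_counts array i hm.1 hm.2]
      rfl
  calc (PySem.List.pyRange 0 (PySem.List.len array)).foldl _ none
      = (PySem.List.pyRange 0 (PySem.List.len array)).foldl
          (fun (acc : Option Int) j => gStep array acc (PySem.List.pyGetD array j 0)) none :=
        PySem.List.foldl_congr_mem _ _ _ none h
    _ = array.foldl (gStep array) none := PySem.List.foldl_pyRange_zero_pyGetD array 0 (gStep array) none

lemma b_eq_fold (array : List Int) : mediana_array_alt array = array.foldl (gStep array) none := by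
  unfold mediana_array_alt
  refine PySem.List.foldl_congr_mem _ _ _ none ?_
  intro acc x _
  cases acc with
  | some r => rfl
  | none =>
    dsimp only
    rw [bisectLeft_eq_cntLt, bisectRight_eq_cntLe]
    have hlen : PySem.List.len array = (array.length : Int) := by simp [PySem.List.len]
    have ht := cnt_tri array x
    have hs := cnt_le_split array x
    have hg : PySem.List.len array - (cntLe array x : Int) = (cntGt array x : Int) := by
      rw [hlen]; omega
    rw [hg]
    have he : PySem.List.len array - (cntLt array x : Int) - (cntGt array x : Int) - 1
        = (cntEq array x : Int) - 1 := by rw [hlen]; omega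
    rw [he]
    by_cases hc : (cntLt array x : Int) = (cntGt array x : Int)
    · simp [gStep, hc]
    · simp [gStep, hc]

-- ===== VERDICT (by name: the statement is the Claim_ definition above) =====
theorem mediana_array_spec : Claim_equal_mediana_array := by
  intro array _
  unfold Spec_mediana_array
  rw [a_eq_fold, b_eq_fold]
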